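-- pv_equiv track=rewrite | github.com/NeverQuitYourDayDream/cfslns | python/869B.py | solve
-- ===== SOURCE A (Python) =====
-- def solve(a, b):
--     if a == b:
--         return 1
--     elif a > b:
--         return 0
--     else:
--         ld = 1
--         for i in range(a + 1, b + 1):
--             ld = (ld * i%10) % 10
--             if ld == 0:
--                 break
--
--     return ld
-- ===== SOURCE B (Python) =====
-- def solve(a, b):
--     if a > b:
--         return 0
--     # any 5 consecutive integers contain a multiple of 5 and an even number,
--     # so the product's last digit is 0 whenever the range has >= 5 factors
--     if b - a >= 5:
--         return 0
--     p = 1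
--     for i in range(a + 1, b + 1):
--         p *= i
--     return p % 10
-- ===== Notes on version B (the rewrite author's own statement) =====
-- stated objective: alternative
-- what changed: B replaces A's streaming last-digit loop with early break by an O(1) number-theoretic shortcut (ranges of length >= 5 always end in 0) plus a full product of at most 4 factors followed by a single mod.
import Mathlib
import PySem

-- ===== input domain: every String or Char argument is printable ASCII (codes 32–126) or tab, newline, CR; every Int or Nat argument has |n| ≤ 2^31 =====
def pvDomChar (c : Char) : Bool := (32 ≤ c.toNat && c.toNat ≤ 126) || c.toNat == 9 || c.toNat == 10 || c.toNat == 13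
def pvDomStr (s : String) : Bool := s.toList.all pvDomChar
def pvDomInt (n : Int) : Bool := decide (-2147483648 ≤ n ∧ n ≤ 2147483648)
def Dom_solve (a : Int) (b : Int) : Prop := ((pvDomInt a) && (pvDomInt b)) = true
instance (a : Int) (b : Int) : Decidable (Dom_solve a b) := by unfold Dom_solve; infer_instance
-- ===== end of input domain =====

-- B replaces A's streaming last-digit loop (with its early break on 0) by a
-- number-theoretic shortcut: a product of ≥ 5 consecutive factors always ends
-- in 0; otherwise the full product of at most 4 factors is reduced mod 10 once.

-- ===== PORT A =====
-- the for-loop of A: running last digit ld, early break when it reaches 0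
def solveGo (b : Int) (i : Int) (ld : Int) : Int :=
  if _h : i < b + 1 then
    let ld' := PySem.Int.mod (ld * PySem.Int.mod i 10) 10
    if ld' = 0 then ld' else solveGo b (i + 1) ld'
  else ld
termination_by (b + 1 - i).toNat
decreasing_by omega

def solve (a : Int) (b : Int) : Int :=
  if a = b then 1
  else if a > b then 0
  else solveGo b (a + 1) 1

-- ===== PORT B =====
def solve_alt (a : Int) (b : Int) : Int :=
  if a > b then 0
  else if b - a ≥ 5 then 0
  else PySem.Int.mod ((PySem.List.pyRange (a + 1) (b + 1) 1).foldl (· * ·) 1) 10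

-- ===== PRECONDITION & SPEC =====
def Spec_solve (a : Int) (b : Int) (out : Int) : Prop := out = solve_alt a b
instance (a : Int) (b : Int) (out : Int) : Decidable (Spec_solve a b out) := by unfold Spec_solve; infer_instance

-- ===== CLAIM (what is proved, stated in full; the proofs are below) =====
def Claim_equal_solve : Prop := ∀ (a : Int) (b : Int), Dom_solve a b → Spec_solve a b (solve a b)

-- ===== LEMMAS AND PROOFS =====

lemma foldl_mul_eq (xs : List Int) (c : Int) : xs.foldl (· * ·) c = c * xs.prod := by
  induction xs generalizing c with
  | nil => simp
  | cons x xs ih => simp [List.foldl_cons, ih, List.prod_cons]; ring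

lemma mod10_mul_left (x y : Int) : (x % 10 * y) % 10 = (x * y) % 10 := by
  conv_lhs => rw [Int.mul_emod]
  conv_rhs => rw [Int.mul_emod]
  simp [Int.emod_emod_of_dvd]

lemma mod10_mul_right (x y : Int) : (x * (y % 10)) % 10 = (x * y) % 10 := by
  conv_lhs => rw [Int.mul_emod]
  conv_rhs => rw [Int.mul_emod]
  simp [Int.emod_emod_of_dvd]

-- the loop computes (ld * product of the remaining range) mod 10, for reduced ld
lemma pymod10 (x : Int) : PySem.Int.mod x 10 = x % 10 :=
  PySem.Int.mod_eq_emod_of_pos (by norm_num)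

lemma mod10_congr (x y z : Int) (h : x % 10 = y % 10) : (x * z) % 10 = (y * z) % 10 := by
  rw [Int.mul_emod, h, ← Int.mul_emod]

lemma solveGo_eq (b : Int) : ∀ (i ld : Int), ld % 10 = ld →
    solveGo b i ld = (ld * (PySem.List.pyRange i (b + 1) 1).prod) % 10 := by
  intro i ld hld
  induction i, ld using solveGo.induct b with
  | case1 i ld h ld' h0 =>
    rw [solveGo]
    simp only [dif_pos h]
    have h0e : PySem.Int.mod (ld * PySem.Int.mod i 10) 10 = 0 := h0
    rw [if_pos h0, h0e, PySem.List.pyRange_one_cons (by omega), List.prod_cons]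
    have h0' : (ld * i) % 10 = 0 := by
      have h1 := h0e
      rw [pymod10, pymod10, mod10_mul_right] at h1
      exact h1
    rw [← mul_assoc]
    exact (Int.emod_eq_zero_of_dvd ((Int.dvd_of_emod_eq_zero h0').mul_right _)).symm
  | case2 i ld h ld' h0 ih =>
    rw [solveGo]
    simp only [dif_pos h]
    rw [if_neg h0]
    have hmod : (PySem.Int.mod (ld * PySem.Int.mod i 10) 10) % 10
        = PySem.Int.mod (ld * PySem.Int.mod i 10) 10 := by
      rw [pymod10]
      exact Int.emod_emod_of_dvd _ dvd_rfl
    have hld'e : ld' = PySem.Int.mod (ld * PySem.Int.mod i 10) 10 := rfl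
    rw [PySem.List.pyRange_one_cons (show i < b + 1 from h), List.prod_cons,
        ih hmod, hld'e, pymod10, pymod10, mod10_mul_left,
        mod10_congr _ _ _ (mod10_mul_right ld i), mul_assoc]
  | case3 i ld h =>
    rw [solveGo]
    simp only [dif_neg h]
    rw [PySem.List.pyRange_one_eq_nil (by omega), List.prod_nil, mul_one, hld]

-- a product over ≥ 5 consecutive integers is divisible by 10
lemma prod_range_dvd10 (a b : Int) (h : b - a ≥ 5) :
    (10 : Int) ∣ (PySem.List.pyRange (a + 1) (b + 1) 1).prod := by
  have h2 : (2 : Int) ∣ (PySem.List.pyRange (a + 1) (b + 1) 1).prod := by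
    refine dvd_trans (dvd_mul_right 2 ((a + 2) / 2)) (List.dvd_prod ?_)
    rw [PySem.List.mem_pyRange_one]
    omega
  have h5 : (5 : Int) ∣ (PySem.List.pyRange (a + 1) (b + 1) 1).prod := by
    refine dvd_trans (dvd_mul_right 5 ((a + 5) / 5)) (List.dvd_prod ?_)
    rw [PySem.List.mem_pyRange_one]
    omega
  omega

-- ===== VERDICT (by name: the statement is the Claim_ definition above) =====
theorem solve_spec : Claim_equal_solve := by
  intro a b _
  unfold Spec_solve solve solve_alt
  by_cases hab : a = b
  · subst hab
    rw [if_pos rfl, if_neg (lt_irrefl a), if_neg (by omega),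
        PySem.List.pyRange_one_eq_nil (by omega)]
    decide
  · rw [if_neg hab]
    by_cases hgt : a > b
    · rw [if_pos hgt, if_pos hgt]
    · rw [if_neg hgt, if_neg hgt]
      have hlt : a < b := by omega
      rw [solveGo_eq b (a + 1) 1 (by decide), one_mul, foldl_mul_eq, one_mul]
      by_cases h5 : b - a ≥ 5
      · rw [if_pos h5]
        exact Int.emod_eq_zero_of_dvd (prod_range_dvd10 a b h5)
      · rw [if_neg h5, pymod10 _]
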